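-- pv_equiv track=rewrite | github.com/bakrantz/Pept-Class | Peptide-Classifier/segment_translocations_with_global_and_event_level_features.py | calculate_first_transition_time
-- ===== SOURCE A (Python) =====
-- def calculate_first_transition_time(state_sequence_list):
--     """
--     Calculates the time (index) of the first transition in a state sequence.
--
--     Args:
--         state_sequence_list (list): A list representing the state sequence of a translocation event.
--
--     Returns:
--         int: The index of the first transition, or -1 if no transition occurs.
--     """
--     if not state_sequence_list:
--         return -1  # Handle empty sequence
--
--     first_state = state_sequence_list[0]
--     for i, state in enumerate(state_sequence_list):
--         if state != first_state:
--             return i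
--     return -1  # No transition found
-- ===== SOURCE B (Python) =====
-- def calculate_first_transition_time(state_sequence_list):
--     ans = -1
--     for i in range(len(state_sequence_list) - 1, 0, -1):
--         if state_sequence_list[i] != state_sequence_list[i - 1]:
--             ans = i
--     return ans
-- ===== Notes on version B (the rewrite author's own statement) =====
-- stated objective: alternative
-- what changed: B makes a single full right-to-left pass over adjacent index pairs, overwriting an accumulator with each mismatch index so the leftmost one survives, instead of A's forward early-return scan comparing every element against the saved first element; no separate empty-list guard is needed.
import Mathlib
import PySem

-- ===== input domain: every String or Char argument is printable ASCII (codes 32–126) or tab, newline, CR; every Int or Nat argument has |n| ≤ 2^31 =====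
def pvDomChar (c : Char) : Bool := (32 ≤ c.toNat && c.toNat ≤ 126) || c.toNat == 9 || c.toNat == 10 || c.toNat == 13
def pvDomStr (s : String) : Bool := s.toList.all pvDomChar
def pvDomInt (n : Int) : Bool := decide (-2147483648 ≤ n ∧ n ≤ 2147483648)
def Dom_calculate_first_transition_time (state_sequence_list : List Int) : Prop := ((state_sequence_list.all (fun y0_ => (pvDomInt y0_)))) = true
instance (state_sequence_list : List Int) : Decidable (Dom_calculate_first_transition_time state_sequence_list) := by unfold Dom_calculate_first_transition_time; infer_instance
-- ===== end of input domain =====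

-- B replaces A's forward early-return anchor scan with a full right-to-left pass over adjacent index pairs kept in an accumulator; alternative decomposition, same cost.


-- ===== PORT A =====
-- A: guard for empty, save first element, enumerate and return first index whose state ≠ first.
def pvALoop (first : Int) : List Int → Int → Int
  | [], _ => -1
  | s :: rest, i => if s ≠ first then i else pvALoop first rest (i + 1)

def calculate_first_transition_time (state_sequence_list : List Int) : Int :=
  match state_sequence_list with
  | [] => -1
  | f :: _ => pvALoop f state_sequence_list 0

-- ===== PORT B =====
-- B: for i in range(len(xs)-1, 0, -1): if xs[i] != xs[i-1]: ans = i  — full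
-- right-to-left pass, accumulator keeps the last write (= leftmost mismatch).
def calculate_first_transition_time_alt (state_sequence_list : List Int) : Int :=
  (PySem.List.pyRange ((state_sequence_list.length : Int) - 1) 0 (-1)).foldl
    (fun ans i =>
      if PySem.List.pyGetD state_sequence_list i 0 ≠ PySem.List.pyGetD state_sequence_list (i - 1) 0
      then i else ans)
    (-1)

-- ===== PRECONDITION & SPEC =====
def Spec_calculate_first_transition_time (state_sequence_list : List Int) (out : Int) : Prop := out = calculate_first_transition_time_alt state_sequence_list
instance (state_sequence_list : List Int) (out : Int) : Decidable (Spec_calculate_first_transition_time state_sequence_list out) := by unfold Spec_calculate_first_transition_time; infer_instance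

-- ===== CLAIM (what is proved, stated in full; the proofs are below) =====
def Claim_equal_calculate_first_transition_time : Prop := ∀ (state_sequence_list : List Int), Dom_calculate_first_transition_time state_sequence_list → Spec_calculate_first_transition_time state_sequence_list (calculate_first_transition_time state_sequence_list)

-- ===== LEMMAS AND PROOFS =====

-- forward neighbour scan: first index i (counting from start+1) with unequal adjacent pair, else -1
def pvFm : List Int → Int → Int
  | a :: b :: t, i => if a ≠ b then i + 1 else pvFm (b :: t) (i + 1)
  | _, _ => -1

theorem pvALoop_eq_fm (a : Int) (t : List Int) : ∀ i : Int, pvALoop a t (i + 1) = pvFm (a :: t) i := by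
  induction t generalizing a with
  | nil => intro i; simp [pvALoop, pvFm]
  | cons s t' ih =>
    intro i
    by_cases h : s = a
    · subst h
      simp only [pvALoop, pvFm, ne_eq, not_true_eq_false, if_false]
      exact ih s (i + 1)
    · simp [pvALoop, pvFm, h, Ne.symm h]

theorem pvA_eq_fm (xs : List Int) : calculate_first_transition_time xs = pvFm xs 0 := by
  cases xs with
  | nil => rfl
  | cons f rest =>
    show pvALoop f (f :: rest) 0 = pvFm (f :: rest) 0
    have h0 : pvALoop f (f :: rest) 0 = pvALoop f rest 1 := by simp [pvALoop]
    rw [h0]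
    simpa using pvALoop_eq_fm f rest 0

-- B's fold, after reversing the countdown range, is a foldr over the ascending
-- range [lo+1, …, b]; that foldr computes pvFm on the corresponding suffix.
theorem pvFoldr_eq_fm (xs : List Int) : ∀ (l : List Int) (i : Nat), xs.drop i = l →
    (PySem.List.pyRange ((i : Int) + 1) (xs.length : Int) 1).foldr
      (fun j ans =>
        if PySem.List.pyGetD xs j 0 ≠ PySem.List.pyGetD xs (j - 1) 0 then j else ans)
      (-1)
    = pvFm l (i : Int) := by
  intro l
  induction l with
  | nil =>
    intro i hd
    have hlen : xs.length ≤ i := by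
      have := congrArg List.length hd; simp at this; omega
    rw [PySem.List.pyRange_one_eq_nil (by exact_mod_cast by omega)]
    simp [pvFm]
  | cons a t ih =>
    intro i hd
    have hi : i < xs.length := by
      have := congrArg List.length hd; simp at this; omega
    have hxi : xs[i]? = some a := by
      have : (xs.drop i)[0]? = some a := by rw [hd]; rfl
      simpa using this
    cases t with
    | nil =>
      have hlen : xs.length = i + 1 := by
        have := congrArg List.length hd; simp at this; omega
      rw [hlen]
      rw [PySem.List.pyRange_one_eq_nil (by push_cast; omega)]
      simp [pvFm]
    | cons b t' =>
      have hi1 : i + 1 < xs.length := by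
        have := congrArg List.length hd; simp at this; omega
      have hxi1 : xs[i+1]? = some b := by
        have : (xs.drop i)[1]? = some b := by rw [hd]; rfl
        simpa using this
      have hcons : PySem.List.pyRange ((i : Int) + 1) (xs.length : Int) 1
          = ((i : Int) + 1) :: PySem.List.pyRange ((i : Int) + 1 + 1) (xs.length : Int) 1 :=
        PySem.List.pyRange_one_cons (by exact_mod_cast by omega)
      have hdrop : xs.drop (i + 1) = b :: t' := by
        have : (xs.drop i).drop 1 = b :: t' := by rw [hd]; rfl
        simpa [List.drop_drop] using this
      have hga : PySem.List.pyGetD xs ((i : Int) + 1) 0 = b := by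
        have h1 : ((i : Int) + 1) = ((i + 1 : Nat) : Int) := by push_cast; ring
        rw [h1, PySem.List.pyGetD_natCast]
        simp [List.getD, hxi1]
      have hgb : PySem.List.pyGetD xs ((i : Int) + 1 - 1) 0 = a := by
        have h1 : ((i : Int) + 1 - 1) = ((i : Nat) : Int) := by ring
        rw [h1, PySem.List.pyGetD_natCast]
        simp [List.getD, hxi]
      rw [hcons]
      simp only [List.foldr_cons, hga, hgb]
      have hrec := ih (i + 1) hdrop
      have harg : ((i : Int) + 1 + 1) = (((i + 1 : Nat) : Int) + 1) := by push_cast; ring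
      rw [harg, hrec]
      by_cases h : a = b
      · simp [pvFm, h]
      · simp [pvFm, h, Ne.symm h]

-- ===== VERDICT (by name: the statement is the Claim_ definition above) =====
theorem calculate_first_transition_time_spec : Claim_equal_calculate_first_transition_time := by
  intro xs _
  unfold Spec_calculate_first_transition_time calculate_first_transition_time_alt
  rw [pvA_eq_fm]
  rw [PySem.List.pyRange_neg_one_eq_reverse, List.foldl_reverse]
  have h : ((0 : Int) + 1) = ((0 : Nat) : Int) + 1 := by norm_num
  have h2 : ((xs.length : Int) - 1 + 1) = (xs.length : Int) := by ring
  rw [h2, h, pvFoldr_eq_fm xs xs 0 (by simp)]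
  norm_num
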